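-- pv_equiv track=rewrite | github.com/AlexVolkovCML/PythonLearningDataAnalysis | hw_task_2/hw_task_2.py | counter
-- ===== SOURCE A (Python) =====
-- def counter(x):                       # функция, вычисляет максимально возможное число столбов из кубиков, образующих лесенку
--     height = 1                        # высота первого столба
--     count = 0
--     for i in range(x):
--         if x - height >= 0:           # если оставшихся кубиков, больше, чем высота предыдущего столба +1,
--             x = x - height            # вычисляется количество оставшихся кубиков
--             count += 1                # к счетчику добавляется единица
--             height += 1               # высота последнего столба увеличивается на 1
--     return count                      # возвращает максимально возможное число столбов
-- ===== SOURCE B (Python) =====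
-- def counter(x):
--     # Binary search for the largest k with k*(k+1)//2 <= x (O(log x) vs A's O(x) loop).
--     if x <= 0:
--         return 0
--     lo, hi = 0, x
--     while lo < hi:
--         mid = (lo + hi + 1) // 2
--         if mid * (mid + 1) <= 2 * x:
--             lo = mid
--         else:
--             hi = mid - 1
--     return lo
-- ===== Notes on version B (the rewrite author's own statement) =====
-- stated objective: faster
-- what changed: Replaced A's linear loop that subtracts successive column heights one by one with a binary search for the largest step count whose triangular number still fits in x.
import Mathlib
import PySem

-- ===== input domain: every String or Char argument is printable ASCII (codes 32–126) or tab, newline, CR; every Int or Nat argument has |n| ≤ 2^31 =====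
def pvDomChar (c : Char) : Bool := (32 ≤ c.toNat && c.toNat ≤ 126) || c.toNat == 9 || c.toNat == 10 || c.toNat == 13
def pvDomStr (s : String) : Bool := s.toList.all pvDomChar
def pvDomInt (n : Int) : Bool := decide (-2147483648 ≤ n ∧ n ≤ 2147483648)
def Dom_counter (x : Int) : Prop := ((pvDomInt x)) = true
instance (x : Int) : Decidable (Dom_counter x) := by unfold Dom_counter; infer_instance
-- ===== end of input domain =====

-- B replaces A's O(x) step-by-step subtraction loop with a binary search for the
-- largest k with k*(k+1)/2 ≤ x (O(log x)); objective: faster.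

-- ===== PORT A =====
-- state = (x, height, count), as in the Python loop
def counterStep (s : Int × Int × Int) : Int × Int × Int :=
  if s.1 - s.2.1 ≥ 0 then (s.1 - s.2.1, s.2.1 + 1, s.2.2 + 1) else s

def counter (x : Int) : Int :=
  ((PySem.List.pyRange 0 x 1).foldl (fun s _ => counterStep s) (x, 1, 0)).2.2

-- ===== PORT B =====
-- midpoint bounds needed for termination
theorem counterBS_mid_bounds (lo hi : Int) (h : lo < hi) :
    lo < PySem.Int.floordiv (lo + hi + 1) 2 ∧ PySem.Int.floordiv (lo + hi + 1) 2 ≤ hi := by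
  rw [PySem.Int.floordiv_eq_ediv_of_pos (by omega : (0:Int) < 2)]
  omega

def counterBS (x lo hi : Int) : Int :=
  if h : lo < hi then
    let mid := PySem.Int.floordiv (lo + hi + 1) 2
    if mid * (mid + 1) ≤ 2 * x then counterBS x mid hi
    else counterBS x lo (mid - 1)
  else lo
termination_by (hi - lo).toNat
decreasing_by
  · have := counterBS_mid_bounds lo hi h; omega
  · have := counterBS_mid_bounds lo hi h; omega

def counter_alt (x : Int) : Int :=
  if x ≤ 0 then 0 else counterBS x 0 x

-- ===== PRECONDITION & SPEC =====
def Spec_counter (x : Int) (out : Int) : Prop := out = counter_alt x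
instance (x : Int) (out : Int) : Decidable (Spec_counter x out) := by unfold Spec_counter; infer_instance

-- ===== CLAIM (what is proved, stated in full; the proofs are below) =====
def Claim_equal_counter : Prop := ∀ (x : Int), Dom_counter x → Spec_counter x (counter x)

-- ===== LEMMAS AND PROOFS =====

-- iterate the loop body n times (foldl over pyRange ignores the element)
def counterIter (n : Nat) (s : Int × Int × Int) : Int × Int × Int :=
  match n with
  | 0 => s
  | n + 1 => counterIter n (counterStep s)

theorem foldl_const_iter (l : List Int) (s : Int × Int × Int) :
    l.foldl (fun s _ => counterStep s) s = counterIter l.length s := by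
  induction l generalizing s with
  | nil => rfl
  | cons a t ih => simp [List.foldl, counterIter, ih]

theorem counter_eq_iter (x : Int) :
    counter x = (counterIter (x - 0).toNat (x, 1, 0)).2.2 := by
  unfold counter
  rw [foldl_const_iter, PySem.List.length_pyRange_one]

-- once the condition fails the state is frozen
theorem counterIter_frozen (n : Nat) (r h c : Int) (hrc : r - h < 0) :
    counterIter n (r, h, c) = (r, h, c) := by
  induction n with
  | zero => rfl
  | succ n ih =>
    have hs : counterStep (r, h, c) = (r, h, c) := by
      simp only [counterStep]
      rw [if_neg (by omega : ¬ r - h ≥ 0)]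
    show counterIter n (counterStep (r, h, c)) = (r, h, c)
    rw [hs]; exact ih

-- loop invariant: final count K satisfies K(K+1) ≤ 2x₀ and either the strict upper
-- bracket or K = c + n (all n iterations succeeded)
theorem counterIter_main (x0 : Int) (n : Nat) (r c : Int) (hc : 0 ≤ c) (hr : 0 ≤ r)
    (hinv : 2 * r = 2 * x0 - c * (c + 1)) :
    0 ≤ (counterIter n (r, c + 1, c)).2.2 ∧
    (counterIter n (r, c + 1, c)).2.2 * ((counterIter n (r, c + 1, c)).2.2 + 1) ≤ 2 * x0 ∧
    (2 * x0 < ((counterIter n (r, c + 1, c)).2.2 + 1) * ((counterIter n (r, c + 1, c)).2.2 + 2) ∨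
      (counterIter n (r, c + 1, c)).2.2 = c + n) := by
  induction n generalizing r c with
  | zero =>
    refine ⟨hc, ?_, Or.inr ?_⟩
    · show c * (c + 1) ≤ 2 * x0
      linarith
    · show c = c + ((0 : Nat) : Int)
      simp
  | succ n ih =>
    by_cases hcond : r - (c + 1) ≥ 0
    · have hstep : counterIter (n + 1) (r, c + 1, c)
          = counterIter n (r - (c + 1), (c + 1) + 1, c + 1) := by
        show counterIter n (counterStep (r, c + 1, c)) = _
        simp only [counterStep]
        rw [if_pos hcond]
      rw [hstep]
      obtain ⟨h1, h2, h3⟩ := ih (r - (c + 1)) (c + 1) (by omega) (by omega)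
        (by linear_combination hinv)
      refine ⟨h1, h2, ?_⟩
      rcases h3 with h3 | h3
      · exact Or.inl h3
      · right; rw [h3]; push_cast; ring
    · have hfz : counterIter (n + 1) (r, c + 1, c) = (r, c + 1, c) :=
        counterIter_frozen _ _ _ _ (by omega)
      rw [hfz]
      refine ⟨hc, ?_, Or.inl ?_⟩
      · show c * (c + 1) ≤ 2 * x0
        linarith
      · show 2 * x0 < (c + 1) * (c + 2)
        nlinarith
-- the bracket determines K uniquely
theorem bracket_unique (x a b : Int) (ha0 : 0 ≤ a) (hb0 : 0 ≤ b)
    (ha1 : a * (a + 1) ≤ 2 * x) (ha2 : 2 * x < (a + 1) * (a + 2))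
    (hb1 : b * (b + 1) ≤ 2 * x) (hb2 : 2 * x < (b + 1) * (b + 2)) : a = b := by
  rcases lt_trichotomy a b with h | h | h
  · nlinarith
  · exact h
  · nlinarith

-- binary search keeps the bracket and ends with lo = hi
theorem counterBS_bracket (x : Int) : ∀ (n : Nat) (lo hi : Int),
    (hi - lo).toNat = n → 0 ≤ lo → lo ≤ hi →
    lo * (lo + 1) ≤ 2 * x → 2 * x < (hi + 1) * (hi + 2) →
    0 ≤ counterBS x lo hi ∧ counterBS x lo hi * (counterBS x lo hi + 1) ≤ 2 * x ∧
      2 * x < (counterBS x lo hi + 1) * (counterBS x lo hi + 2) := by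
  intro n
  induction n using Nat.strong_induction_on with
  | _ n ih =>
    intro lo hi hn h0 hlh h1 h2
    by_cases h : lo < hi
    · have hmid := counterBS_mid_bounds lo hi h
      by_cases hcond : (PySem.Int.floordiv (lo + hi + 1) 2) *
          (PySem.Int.floordiv (lo + hi + 1) 2 + 1) ≤ 2 * x
      · have hunf : counterBS x lo hi = counterBS x (PySem.Int.floordiv (lo + hi + 1) 2) hi := by
          conv_lhs => rw [counterBS]
          rw [dif_pos h]
          exact if_pos hcond
        rw [hunf]
        exact ih (hi - PySem.Int.floordiv (lo + hi + 1) 2).toNat (by omega) _ hi rfl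
          (by omega) (by omega) hcond h2
      · have hunf : counterBS x lo hi
            = counterBS x lo (PySem.Int.floordiv (lo + hi + 1) 2 - 1) := by
          conv_lhs => rw [counterBS]
          rw [dif_pos h]
          exact if_neg hcond
        rw [hunf]
        refine ih (PySem.Int.floordiv (lo + hi + 1) 2 - 1 - lo).toNat (by omega) lo _ rfl
          h0 (by omega) h1 ?_
        have hgt := not_le.mp hcond
        nlinarith
    · have hunf : counterBS x lo hi = lo := by
        rw [counterBS]
        exact dif_neg h
      have heq : lo = hi := by omega
      rw [hunf]
      exact ⟨h0, h1, by rw [heq]; exact h2⟩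

-- ===== VERDICT (by name: the statement is the Claim_ definition above) =====
theorem counter_spec : Claim_equal_counter := by
  intro x _
  unfold Spec_counter counter_alt
  by_cases hx : x ≤ 0
  · rw [if_pos hx, counter_eq_iter]
    have h0 : (x - 0).toNat = 0 := by omega
    rw [h0]; rfl
  · rw [if_neg hx]
    have hx1 : 1 ≤ x := by omega
    have hA := counterIter_main x (x - 0).toNat x 0 le_rfl (by omega) (by ring)
    simp only [zero_add] at hA
    rw [← counter_eq_iter x] at hA
    obtain ⟨hA0, hA1, hA2⟩ := hA
    have hA2' : 2 * x < (counter x + 1) * (counter x + 2) := by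
      rcases hA2 with h | h
      · exact h
      · have hxx : counter x = x := by omega
        rw [hxx]; nlinarith
    obtain ⟨hB0, hB1, hB2⟩ := counterBS_bracket x (x - 0).toNat 0 x (by omega) le_rfl
      (by omega) (by omega) (by nlinarith)
    exact bracket_unique x (counter x) (counterBS x 0 x) hA0 hB0 hA1 hA2' hB1 hB2
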